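-- pv_equiv track=rewrite | github.com/X-Kusitms-1/ZIGHANG_ENTERPRISE_PROJECT_CRAWL | crawlers/nogshim-r.py | parse_pages_env
-- ===== SOURCE A (Python) =====
-- from typing import List, Optional, Dict
--
-- def parse_pages_env(p: Optional[str]) -> Optional[List[int]]:
--     if not p: return None
--     p = p.strip()
--     if not p: return None
--     nums = set()
--     for part in p.split(","):
--         part = part.strip()
--         if not part: continue
--         if "-" in part:
--             a, b = part.split("-", 1)
--             a, b = int(a), int(b)
--             if a > b: a, b = b, a
--             nums.update(range(a, b + 1))
--         else:
--             nums.add(int(part))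
--     return sorted(nums) if nums else None
-- ===== SOURCE B (Python) =====
-- from typing import List, Optional
--
-- def parse_pages_env(p: Optional[str]) -> Optional[List[int]]:
--     if not p: return None
--     p = p.strip()
--     if not p: return None
--     # parse each comma token into an (lo, hi) interval
--     intervals = []
--     for part in p.split(","):
--         part = part.strip()
--         if not part: continue
--         if "-" in part:
--             a, b = part.split("-", 1)
--             a, b = int(a), int(b)
--             intervals.append((b, a) if a > b else (a, b))
--         else:
--             n = int(part)
--             intervals.append((n, n))
--     # sort by lower bound, sweep once merging overlapping/adjacent intervals,
--     # emitting each finished block — the output is sorted and duplicate-free.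
--     intervals.sort(key=lambda iv: iv[0])
--     out = []
--     cur = None
--     for lo, hi in intervals:
--         if cur is None:
--             cur = (lo, hi)
--         elif lo <= cur[1] + 1:
--             if hi > cur[1]:
--                 cur = (cur[0], hi)
--         else:
--             out.extend(range(cur[0], cur[1] + 1))
--             cur = (lo, hi)
--     if cur is None:
--         return None
--     out.extend(range(cur[0], cur[1] + 1))
--     return out
-- ===== Notes on version B (the rewrite author's own statement) =====
-- stated objective: alternative
-- what changed: A dumps every covered integer of every token into a set and sorts it; B instead collects one (lo,hi) interval pair per token, sorts the pairs by lo, and emits the result in a single merge sweep that expands each maximal block, so no set and no final sort over the expanded numbers is needed.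
import Mathlib
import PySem

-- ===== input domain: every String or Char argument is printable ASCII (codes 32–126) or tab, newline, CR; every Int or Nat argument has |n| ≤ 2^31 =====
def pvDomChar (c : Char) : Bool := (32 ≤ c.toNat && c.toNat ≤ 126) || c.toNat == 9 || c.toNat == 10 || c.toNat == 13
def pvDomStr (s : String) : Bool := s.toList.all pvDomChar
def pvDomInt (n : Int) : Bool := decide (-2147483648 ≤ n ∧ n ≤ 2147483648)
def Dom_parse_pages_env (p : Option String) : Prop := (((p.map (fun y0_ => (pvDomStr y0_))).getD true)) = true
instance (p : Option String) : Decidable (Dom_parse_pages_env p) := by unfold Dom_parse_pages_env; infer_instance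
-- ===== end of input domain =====

-- B replaces A's "dump every covered integer into a set, then sort" by "collect (lo,hi)
-- interval pairs, sort them by lo, and merge-and-expand in one sweep" (objective: alternative).

-- ===== PORT A =====
-- loop body of A's 'for part in p.split(",")'; int()'s ValueError is excluded by
-- Pre_parse_pages_env, so the '.getD 0' defaults are never read on admitted inputs
def pvAStep (s : PySem.Set Int) (part0 : String) : PySem.Set Int :=
  let part := PySem.Str.strip part0
  if part = "" then s
  else if PySem.Str.isIn "-" part then
    let ab := (PySem.Str.splitMax? part "-" 1).getD []
    let a := (PySem.Int.ofStr? (ab[0]?.getD "")).getD 0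
    let b := (PySem.Int.ofStr? (ab[1]?.getD "")).getD 0
    let p2 := if a > b then (b, a) else (a, b)
    PySem.Set.update s (PySem.List.pyRange p2.1 (p2.2 + 1))
  else PySem.Set.add s ((PySem.Int.ofStr? part).getD 0)

def parse_pages_env (p : Option String) : Option (List Int) :=
  match p with
  | none => none
  | some p0 =>
    if p0 = "" then none else
    let q := PySem.Str.strip p0
    if q = "" then none else
    let nums : PySem.Set Int := ((PySem.Str.split? q ",").getD []).foldl pvAStep []
    if nums = [] then none else some (PySem.List.sorted nums (fun x => x))

-- ===== PORT B =====
-- loop body of B's parse loop: append one (lo, hi) pair per non-empty token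
def pvBParse (acc : List (Int × Int)) (part0 : String) : List (Int × Int) :=
  let part := PySem.Str.strip part0
  if part = "" then acc
  else if PySem.Str.isIn "-" part then
    let ab := (PySem.Str.splitMax? part "-" 1).getD []
    let a := (PySem.Int.ofStr? (ab[0]?.getD "")).getD 0
    let b := (PySem.Int.ofStr? (ab[1]?.getD "")).getD 0
    acc ++ [if a > b then (b, a) else (a, b)]
  else
    let n := (PySem.Int.ofStr? part).getD 0
    acc ++ [(n, n)]

-- loop body of B's merge sweep; state = (emitted output, current open block)
def pvBMerge (st : List Int × Option (Int × Int)) (iv : Int × Int) :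
    List Int × Option (Int × Int) :=
  match st.2 with
  | none => (st.1, some iv)
  | some c =>
    if iv.1 ≤ c.2 + 1 then
      if iv.2 > c.2 then (st.1, some (c.1, iv.2)) else st
    else (st.1 ++ PySem.List.pyRange c.1 (c.2 + 1), some iv)

def parse_pages_env_alt (p : Option String) : Option (List Int) :=
  match p with
  | none => none
  | some p0 =>
    if p0 = "" then none else
    let q := PySem.Str.strip p0
    if q = "" then none else
    let intervals := ((PySem.Str.split? q ",").getD []).foldl pvBParse []
    let res := (PySem.List.sorted intervals (fun iv => iv.1)).foldl pvBMerge ([], none)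
    match res.2 with
    | none => none
    | some c => some (res.1 ++ PySem.List.pyRange c.1 (c.2 + 1))

-- ===== PRECONDITION & SPEC =====
-- a non-empty stripped token must be int-parseable (both halves, for an 'a-b' token)
def pvTokOK (part0 : String) : Bool :=
  let part := PySem.Str.strip part0
  part == "" ||
  (if PySem.Str.isIn "-" part then
     (PySem.Int.ofStr? (((PySem.Str.splitMax? part "-" 1).getD [])[0]?.getD "")).isSome &&
     (PySem.Int.ofStr? (((PySem.Str.splitMax? part "-" 1).getD [])[1]?.getD "")).isSome
   else (PySem.Int.ofStr? part).isSome)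

-- Pre_ excludes exactly the inputs on which Python's int() raises ValueError on some token
def Pre_parse_pages_env (p : Option String) : Prop :=
  match p with
  | none => True
  | some p0 =>
    p0 = "" ∨ PySem.Str.strip p0 = "" ∨
    ∀ part0 ∈ (PySem.Str.split? (PySem.Str.strip p0) ",").getD [], pvTokOK part0 = true

instance (p : Option String) : Decidable (Pre_parse_pages_env p) := by
  unfold Pre_parse_pages_env; cases p <;> infer_instance

def pvWitness_parse_pages_env : Option String := some " 1-3, 7 ,5-4 "

def Spec_parse_pages_env (p : Option String) (out : Option (List Int)) : Prop := out = parse_pages_env_alt p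
instance (p : Option String) (out : Option (List Int)) : Decidable (Spec_parse_pages_env p out) := by unfold Spec_parse_pages_env; infer_instance

-- ===== CLAIM (what is proved, stated in full; the proofs are below) =====
def Claim_equal_parse_pages_env : Prop := ∀ (p : Option String), Dom_parse_pages_env p → Pre_parse_pages_env p → Spec_parse_pages_env p (parse_pages_env p)

-- ===== LEMMAS AND PROOFS =====

-- the (lo, hi) interval denoted by one comma token (none for a blank token)
def pvTok (part0 : String) : Option (Int × Int) :=
  let part := PySem.Str.strip part0
  if part = "" then none
  else if PySem.Str.isIn "-" part then
    let ab := (PySem.Str.splitMax? part "-" 1).getD []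
    let a := (PySem.Int.ofStr? (ab[0]?.getD "")).getD 0
    let b := (PySem.Int.ofStr? (ab[1]?.getD "")).getD 0
    some (if a > b then (b, a) else (a, b))
  else
    let n := (PySem.Int.ofStr? part).getD 0
    some (n, n)

def pvIvs (parts : List String) : List (Int × Int) := parts.flatMap (fun t => (pvTok t).toList)

def pvCover (ivs : List (Int × Int)) (x : Int) : Prop := ∃ iv ∈ ivs, iv.1 ≤ x ∧ x ≤ iv.2

lemma pvCover_nil (x : Int) : pvCover [] x ↔ False := by simp [pvCover]

lemma pvCover_cons (iv : Int × Int) (l : List (Int × Int)) (x : Int) :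
    pvCover (iv :: l) x ↔ (iv.1 ≤ x ∧ x ≤ iv.2) ∨ pvCover l x := by
  simp [pvCover]

lemma pvCover_congr {l₁ l₂ : List (Int × Int)} (hp : l₁.Perm l₂) (x : Int) :
    pvCover l₁ x ↔ pvCover l₂ x := by
  unfold pvCover
  constructor <;> rintro ⟨iv, hiv, h⟩
  · exact ⟨iv, hp.mem_iff.mp hiv, h⟩
  · exact ⟨iv, hp.mem_iff.mpr hiv, h⟩

lemma pvAStep_eq (s : PySem.Set Int) (part0 : String) :
    pvAStep s part0 =
      match pvTok part0 with
      | none => s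
      | some iv => PySem.Set.update s (PySem.List.pyRange iv.1 (iv.2 + 1)) := by
  unfold pvAStep pvTok
  dsimp only
  split_ifs with h1 h2 h3
  · rfl
  · rfl
  · rfl
  · dsimp only
    rw [PySem.List.pyRange_one_singleton]
    rfl

lemma pvBParse_eq (acc : List (Int × Int)) (part0 : String) :
    pvBParse acc part0 = acc ++ (pvTok part0).toList := by
  unfold pvBParse pvTok
  dsimp only
  split_ifs <;> simp

lemma pvB_parse_fold (parts : List String) :
    parts.foldl pvBParse [] = pvIvs parts := by
  have h : parts.foldl pvBParse [] =
      parts.foldl (fun acc t => acc ++ (pvTok t).toList) [] :=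
    PySem.List.foldl_congr_mem parts _ _ _ (fun acc t _ => pvBParse_eq acc t)
  rw [h, PySem.List.foldl_append_eq_flatMap]
  rfl

lemma pvA_mem (parts : List String) : ∀ (s : PySem.Set Int) (x : Int),
    x ∈ parts.foldl pvAStep s ↔ x ∈ s ∨ pvCover (pvIvs parts) x := by
  induction parts with
  | nil => intro s x; simp [pvIvs, pvCover]
  | cons t ts ih =>
    intro s x
    simp only [List.foldl_cons, pvAStep_eq]
    have hivs : pvIvs (t :: ts) = (pvTok t).toList ++ pvIvs ts := by simp [pvIvs]
    rw [hivs]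
    cases htok : pvTok t with
    | none => rw [ih]; simp
    | some iv =>
      rw [ih, PySem.Set.mem_update]
      simp only [Option.toList_some, List.singleton_append, pvCover_cons,
        PySem.List.mem_pyRange_one]
      constructor
      · rintro ((hs | hr) | hc)
        · exact Or.inl hs
        · exact Or.inr (Or.inl ⟨hr.1, by omega⟩)
        · exact Or.inr (Or.inr hc)
      · rintro (hs | ⟨h1, h2⟩ | hc)
        · exact Or.inl (Or.inl hs)
        · exact Or.inl (Or.inr ⟨h1, by omega⟩)
        · exact Or.inr hc

lemma pvA_nodup (parts : List String) : ∀ s : PySem.Set Int,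
    s.Nodup → (parts.foldl pvAStep s).Nodup := by
  induction parts with
  | nil => intro s hs; exact hs
  | cons t ts ih =>
    intro s hs
    simp only [List.foldl_cons, pvAStep_eq]
    cases pvTok t with
    | none => exact ih s hs
    | some iv => exact ih _ (PySem.Set.nodup_update s _ hs)

lemma pvTok_lohi (t : String) : ∀ iv, pvTok t = some iv → iv.1 ≤ iv.2 := by
  unfold pvTok
  dsimp only
  generalize (PySem.Int.ofStr? (((PySem.Str.splitMax? (PySem.Str.strip t) "-" 1).getD [])[0]?.getD "")).getD 0 = a
  generalize (PySem.Int.ofStr? (((PySem.Str.splitMax? (PySem.Str.strip t) "-" 1).getD [])[1]?.getD "")).getD 0 = b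
  generalize (PySem.Int.ofStr? (PySem.Str.strip t)).getD 0 = n
  split_ifs with h1 h2 h3 <;> rintro iv htok
  all_goals try exact htok.elim
  all_goals injection htok with htok
  all_goals rw [← htok]
  all_goals dsimp only
  all_goals omega

lemma pvIvs_lohi (parts : List String) : ∀ iv ∈ pvIvs parts, iv.1 ≤ iv.2 := by
  intro iv hiv
  simp only [pvIvs, List.mem_flatMap, Option.mem_toList] at hiv
  obtain ⟨t, _, htok⟩ := hiv
  exact pvTok_lohi t iv htok

def pvFlush (st : List Int × Option (Int × Int)) : List Int :=
  match st.2 with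
  | none => st.1
  | some c => st.1 ++ PySem.List.pyRange c.1 (c.2 + 1)

lemma pvMerge_snd_some (pairs : List (Int × Int)) : ∀ (out : List Int) (c : Int × Int),
    ((pairs.foldl pvBMerge (out, some c)).2).isSome = true := by
  induction pairs with
  | nil => intro out c; rfl
  | cons q qs ih =>
    intro out c
    simp only [List.foldl_cons]
    unfold pvBMerge
    simp only
    split_ifs
    · exact ih out (c.1, q.2)
    · exact ih out c
    · exact ih _ q

-- the one-pass sweep over lo-sorted intervals from an open block (l, h): the flushed
-- result extends 'out' with a strictly increasing list E covering exactly [l,h] ∪ pairs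
lemma pvSweep (pairs : List (Int × Int)) : ∀ (out : List Int) (l h : Int),
    (∀ p ∈ pairs, p.1 ≤ p.2) → (∀ p ∈ pairs, l ≤ p.1) →
    pairs.Pairwise (fun a b => a.1 ≤ b.1) → l ≤ h →
    ∃ E : List Int,
      pvFlush (pairs.foldl pvBMerge (out, some (l, h))) = out ++ E ∧
      E.Pairwise (· < ·) ∧
      (∀ x : Int, x ∈ E ↔ (l ≤ x ∧ x ≤ h) ∨ pvCover pairs x) ∧
      (∀ x ∈ E, l ≤ x) := by
  induction pairs with
  | nil =>
    intro out l h _ _ _ hlh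
    refine ⟨PySem.List.pyRange l (h + 1), rfl, PySem.List.pairwise_lt_pyRange_one _ _, ?_, ?_⟩
    · intro x; rw [PySem.List.mem_pyRange_one, pvCover_nil, or_false]; omega
    · intro x hx; have := PySem.List.mem_pyRange_one.mp hx; omega
  | cons q qs ih =>
    intro out l h h1 h2 h3 hlh
    obtain ⟨ql, qh⟩ := q
    have hq12 : ql ≤ qh := h1 (ql, qh) (by simp)
    have hlq : l ≤ ql := h2 (ql, qh) (by simp)
    have h1' : ∀ p ∈ qs, p.1 ≤ p.2 := fun p hp => h1 p (by simp [hp])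
    have h2' : ∀ p ∈ qs, l ≤ p.1 := fun p hp => h2 p (by simp [hp])
    have hqle : ∀ p ∈ qs, ql ≤ p.1 := (List.pairwise_cons.mp h3).1
    have h3' : qs.Pairwise (fun a b => a.1 ≤ b.1) := (List.pairwise_cons.mp h3).2
    simp only [List.foldl_cons]
    by_cases hc1 : ql ≤ h + 1
    · by_cases hc2 : qh > h
      · have step : pvBMerge (out, some (l, h)) (ql, qh) = (out, some (l, qh)) := by
          simp [pvBMerge, hc1, hc2]
        rw [step]
        obtain ⟨E, hE, hp, hmem, hge⟩ := ih out l qh h1' h2' h3' (le_trans hlq hq12)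
        refine ⟨E, hE, hp, ?_, hge⟩
        intro x
        rw [hmem, pvCover_cons]
        constructor
        · rintro (⟨ha, hb⟩ | hc)
          · by_cases hxh : x ≤ h
            · exact Or.inl ⟨ha, hxh⟩
            · exact Or.inr (Or.inl ⟨by omega, hb⟩)
          · exact Or.inr (Or.inr hc)
        · rintro (⟨ha, hb⟩ | ⟨ha, hb⟩ | hc)
          · exact Or.inl ⟨ha, by omega⟩
          · exact Or.inl ⟨by omega, hb⟩
          · exact Or.inr hc
      · have step : pvBMerge (out, some (l, h)) (ql, qh) = (out, some (l, h)) := by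
          simp [pvBMerge, hc1]
          omega
        rw [step]
        obtain ⟨E, hE, hp, hmem, hge⟩ := ih out l h h1' h2' h3' hlh
        refine ⟨E, hE, hp, ?_, hge⟩
        intro x
        rw [hmem, pvCover_cons]
        constructor
        · rintro (hlh' | hc)
          · exact Or.inl hlh'
          · exact Or.inr (Or.inr hc)
        · rintro (hlh' | ⟨ha, hb⟩ | hc)
          · exact Or.inl hlh'
          · exact Or.inl ⟨by omega, by omega⟩
          · exact Or.inr hc
    · have step : pvBMerge (out, some (l, h)) (ql, qh) =
          (out ++ PySem.List.pyRange l (h + 1), some (ql, qh)) := by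
        simp [pvBMerge, hc1]
      rw [step]
      obtain ⟨E, hE, hp, hmem, hge⟩ := ih (out ++ PySem.List.pyRange l (h + 1)) ql qh h1' hqle h3' hq12
      refine ⟨PySem.List.pyRange l (h + 1) ++ E, ?_, ?_, ?_, ?_⟩
      · rw [hE, List.append_assoc]
      · rw [List.pairwise_append]
        refine ⟨PySem.List.pairwise_lt_pyRange_one _ _, hp, ?_⟩
        intro x hx y hy
        have hx' := PySem.List.mem_pyRange_one.mp hx
        have hy' := hge y hy
        omega
      · intro x
        rw [List.mem_append, PySem.List.mem_pyRange_one, hmem, pvCover_cons]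
        constructor
        · rintro (⟨ha, hb⟩ | ⟨ha, hb⟩ | hc)
          · exact Or.inl ⟨ha, by omega⟩
          · exact Or.inr (Or.inl ⟨ha, hb⟩)
          · exact Or.inr (Or.inr hc)
        · rintro (⟨ha, hb⟩ | ⟨ha, hb⟩ | hc)
          · exact Or.inl ⟨ha, by omega⟩
          · exact Or.inr (Or.inl ⟨ha, hb⟩)
          · exact Or.inr (Or.inr hc)
      · intro x hx
        rcases List.mem_append.mp hx with hx | hx
        · exact (PySem.List.mem_pyRange_one.mp hx).1
        · have := hge x hx; omega

-- ===== VERDICT (by name: the statement is the Claim_ definition above) =====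
theorem parse_pages_env_spec : Claim_equal_parse_pages_env := by
  intro p _ _
  unfold Spec_parse_pages_env parse_pages_env parse_pages_env_alt
  cases p with
  | none => rfl
  | some p0 =>
    by_cases h0 : p0 = ""
    · simp [h0]
    · simp only [h0, if_false]
      by_cases hq : PySem.Str.strip p0 = ""
      · simp [hq]
      · simp only [hq, if_false]
        set parts := (PySem.Str.split? (PySem.Str.strip p0) ",").getD [] with hparts
        set nums := parts.foldl pvAStep ([] : PySem.Set Int) with hnums
        have hnums_mem : ∀ x : Int, x ∈ nums ↔ pvCover (pvIvs parts) x := by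
          intro x; rw [hnums, pvA_mem]; simp
        have hnums_nd : nums.Nodup := pvA_nodup parts [] List.nodup_nil
        rw [pvB_parse_fold]
        rcases hS : PySem.List.sorted (pvIvs parts) (fun iv => iv.1) with _ | ⟨q, qs⟩
        · have hivs : pvIvs parts = [] := (PySem.List.sorted_eq_nil_iff _ _ _).mp hS
          have hnil : nums = [] := by
            apply List.eq_nil_iff_forall_not_mem.mpr
            intro x hx
            have := (hnums_mem x).mp hx
            rw [hivs, pvCover_nil] at this
            exact this
          simp [hnil]
        · have hperm : (q :: qs).Perm (pvIvs parts) := by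
            rw [← hS]; exact PySem.List.sorted_perm _ _ _
          have hpw : (q :: qs).Pairwise (fun a b => a.1 ≤ b.1) := by
            rw [← hS]; exact PySem.List.sorted_pairwise _ _
          have hlohi : ∀ iv ∈ (q :: qs), iv.1 ≤ iv.2 := fun iv hiv =>
            pvIvs_lohi parts iv (hperm.mem_iff.mp hiv)
          obtain ⟨E, hE, hpE, hmemE, _⟩ :=
            pvSweep qs [] q.1 q.2 (fun p hp => hlohi p (by simp [hp]))
              ((List.pairwise_cons.mp hpw).1) ((List.pairwise_cons.mp hpw).2)
              (hlohi q (by simp))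
          have hmergestart : pvBMerge ([], none) q = ([], some (q.1, q.2)) := rfl
          have hfold : (q :: qs).foldl pvBMerge ([], none) =
              qs.foldl pvBMerge ([], some (q.1, q.2)) := by
            rw [List.foldl_cons, hmergestart]
          have hEcov : ∀ x : Int, x ∈ E ↔ pvCover (pvIvs parts) x := by
            intro x
            rw [hmemE, ← pvCover_congr hperm, pvCover_cons]
          have hEnd : E.Nodup := hpE.imp (fun h => ne_of_lt h)
          have hEperm : E.Perm nums :=
            (List.perm_ext_iff_of_nodup hEnd hnums_nd).mpr
              (fun x => (hEcov x).trans (hnums_mem x).symm)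
          have hnnil : nums ≠ [] := by
            intro hnil
            have hqmem : pvCover (pvIvs parts) q.1 :=
              ⟨q, hperm.mem_iff.mp (by simp), le_refl _, hlohi q (by simp)⟩
            have := (hnums_mem q.1).mpr hqmem
            rw [hnil] at this
            exact absurd this (List.not_mem_nil)
          have hsorted : PySem.List.sorted nums (fun x => x) = E :=
            PySem.List.sorted_eq_of_perm_of_pairwise_lt nums E (fun x => x) hEperm hpE
          -- evaluate both sides
          simp only [hfold]
          obtain ⟨c, hc⟩ := Option.isSome_iff_exists.mp (pvMerge_snd_some qs [] (q.1, q.2))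
          rw [hnums] at hnnil ⊢
          simp only [hnnil, if_false, hc]
          have hflush : pvFlush (qs.foldl pvBMerge ([], some (q.1, q.2))) =
              (qs.foldl pvBMerge ([], some (q.1, q.2))).1 ++
                PySem.List.pyRange c.1 (c.2 + 1) := by
            simp [pvFlush, hc]
          rw [hE] at hflush
          rw [← hnums, hsorted, ← hflush]
          simp
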